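-- pv_equiv track=rewrite | github.com/sonambharti/Python | Contest/GFG-183-weekly/3_maximize_subsetXOR.py | maximize_subset
-- ===== SOURCE A (Python) =====
-- def maximize_subset(n):
--     # Start with an empty subset and a variable to track XOR
--     subset = []
--     current_xor = 0
--
--     # Traverse numbers from 1 to n
--     for i in range(1, n + 1):
--         # Add the number to the subset
--         subset.append(i)
--         current_xor ^= i
--
--         # If the XOR matches n, we're done
--         if current_xor == n:
--             return subset
--
--     # If the XOR does not match n, check to fix it
--     if current_xor != n:
--         # The number to remove to fix XOR mismatch
--         fix_number = current_xor ^ n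
--         # Ensure the number to remove is in the subset and is valid
--         if fix_number in subset:
--             subset.remove(fix_number)
--
--     return subset
-- ===== SOURCE B (Python) =====
-- def maximize_subset(n):
--     # closed form for XOR(1..n) (period 4); 0 for n <= 0
--     if n <= 0:
--         x = 0
--     elif n % 4 == 0:
--         x = n
--     elif n % 4 == 1:
--         x = 1
--     elif n % 4 == 2:
--         x = n + 1
--     else:
--         x = 0
--     result = list(range(1, n + 1))
--     if x == n:
--         return result
--     fix = x ^ n
--     if fix in result:
--         result.remove(fix)
--     return result
-- ===== Notes on version B (the rewrite author's own statement) =====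
-- stated objective: simpler
-- what changed: B replaces A's accumulate-and-early-return XOR loop over 1..n by the period-4 closed form for XOR(1..n) followed by a single conditional removal from list(range(1,n+1)).
import Mathlib
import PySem

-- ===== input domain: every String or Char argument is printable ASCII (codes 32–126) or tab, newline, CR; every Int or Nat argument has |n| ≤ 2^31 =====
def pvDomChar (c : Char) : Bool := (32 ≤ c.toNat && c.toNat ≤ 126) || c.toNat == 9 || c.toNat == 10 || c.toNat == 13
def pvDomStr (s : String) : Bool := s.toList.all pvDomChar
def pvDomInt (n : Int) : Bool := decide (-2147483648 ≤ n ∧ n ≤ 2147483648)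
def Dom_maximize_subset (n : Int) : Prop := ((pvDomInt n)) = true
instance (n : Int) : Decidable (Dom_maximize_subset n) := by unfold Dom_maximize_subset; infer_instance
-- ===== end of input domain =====

-- B replaces A's accumulate-and-early-return XOR loop by the period-4 closed form for
-- XOR(1..n) plus a single conditional removal from range(1,n+1) (objective: simpler).


-- ===== PORT A =====
-- A's code after the loop: check/fix the XOR mismatch by removing fix_number if present
def pvFinishA (n : Int) (subset : List Int) (cxor : Int) : List Int :=
  if cxor ≠ n then
    let fixNumber := PySem.Int.bxor cxor n
    if fixNumber ∈ subset then (PySem.List.remove? subset fixNumber).getD subset else subset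
  else subset

-- A's 'for i in range(1, n+1)' loop with the early return
def pvLoopA (n : Int) : List Int → List Int → Int → List Int
  | [], subset, cxor => pvFinishA n subset cxor
  | i :: rest, subset, cxor =>
    if PySem.Int.bxor cxor i = n then subset ++ [i]
    else pvLoopA n rest (subset ++ [i]) (PySem.Int.bxor cxor i)

def maximize_subset (n : Int) : List Int :=
  pvLoopA n (PySem.List.pyRange 1 (n + 1) 1) [] 0

-- ===== PORT B =====
def maximize_subset_alt (n : Int) : List Int :=
  let x : Int :=
    if n ≤ 0 then 0
    else if PySem.Int.mod n 4 = 0 then n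
    else if PySem.Int.mod n 4 = 1 then 1
    else if PySem.Int.mod n 4 = 2 then n + 1
    else 0
  let result := PySem.List.pyRange 1 (n + 1) 1
  if x = n then result
  else
    let fix := PySem.Int.bxor x n
    if fix ∈ result then (PySem.List.remove? result fix).getD result else result

-- ===== PRECONDITION & SPEC =====
def Spec_maximize_subset (n : Int) (out : List Int) : Prop := out = maximize_subset_alt n
instance (n : Int) (out : List Int) : Decidable (Spec_maximize_subset n out) := by unfold Spec_maximize_subset; infer_instance

-- ===== CLAIM (what is proved, stated in full; the proofs are below) =====
def Claim_equal_maximize_subset : Prop := ∀ (n : Int), Dom_maximize_subset n → Spec_maximize_subset n (maximize_subset n)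

-- ===== LEMMAS AND PROOFS =====

-- prefix XOR of 1..m over Nat
def pxN : Nat → Nat
  | 0 => 0
  | m + 1 => pxN m ^^^ (m + 1)

lemma pxN_closed (m : Nat) :
    pxN m = if m % 4 = 0 then m else if m % 4 = 1 then 1 else if m % 4 = 2 then m + 1 else 0 := by
  induction m with
  | zero => simp [pxN]
  | succ k ih =>
    have hstep : pxN (k + 1) = pxN k ^^^ (k + 1) := rfl
    have h4 : k % 4 = 0 ∨ k % 4 = 1 ∨ k % 4 = 2 ∨ k % 4 = 3 := by omega
    rcases h4 with h | h | h | h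
    · have he : k ^^^ 1 = k + 1 := Nat.xor_one_of_even (Nat.even_iff.mpr (by omega))
      rw [hstep, ih, if_pos h, if_neg (by omega : ¬ (k + 1) % 4 = 0),
        if_pos (by omega : (k + 1) % 4 = 1)]
      conv_lhs => rw [← he]
      exact Nat.xor_xor_cancel_left k 1
    · have he : (k + 1) ^^^ 1 = (k + 1) + 1 := Nat.xor_one_of_even (Nat.even_iff.mpr (by omega))
      rw [hstep, ih, if_neg (by omega : ¬ k % 4 = 0), if_pos h,
        if_neg (by omega : ¬ (k + 1) % 4 = 0), if_neg (by omega : ¬ (k + 1) % 4 = 1),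
        if_pos (by omega : (k + 1) % 4 = 2)]
      rw [Nat.xor_comm]
      exact he
    · rw [hstep, ih, if_neg (by omega : ¬ k % 4 = 0), if_neg (by omega : ¬ k % 4 = 1), if_pos h,
        if_neg (by omega : ¬ (k + 1) % 4 = 0), if_neg (by omega : ¬ (k + 1) % 4 = 1),
        if_neg (by omega : ¬ (k + 1) % 4 = 2)]
      exact Nat.xor_self (k + 1)
    · rw [hstep, ih, if_neg (by omega : ¬ k % 4 = 0), if_neg (by omega : ¬ k % 4 = 1),
        if_neg (by omega : ¬ k % 4 = 2), if_pos (by omega : (k + 1) % 4 = 0)]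
      exact Nat.zero_xor (k + 1)

-- prefix XOR seen from the Int side
def pxI (j : Int) : Int := ((pxN j.toNat : Nat) : Int)

lemma pxI_step (i : Int) (hi : 1 ≤ i) : PySem.Int.bxor (pxI (i - 1)) i = pxI i := by
  obtain ⟨m, rfl⟩ : ∃ m : Nat, i = ((m + 1 : Nat) : Int) := ⟨(i - 1).toNat, by omega⟩
  have h1 : (((m + 1 : Nat) : Int) - 1) = ((m : Nat) : Int) := by push_cast; ring
  rw [h1]
  simp only [pxI, Int.toNat_natCast, PySem.Int.bxor_natCast]
  simp [pxN]

lemma pxI_closed (n : Int) (h : 0 ≤ n) :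
    pxI n = if n % 4 = 0 then n else if n % 4 = 1 then 1 else if n % 4 = 2 then n + 1 else 0 := by
  obtain ⟨m, rfl⟩ : ∃ m : Nat, n = (m : Int) := ⟨n.toNat, by omega⟩
  have hmod : ((m : Int)) % 4 = ((m % 4 : Nat) : Int) := by omega
  have h4 : m % 4 = 0 ∨ m % 4 = 1 ∨ m % 4 = 2 ∨ m % 4 = 3 := by omega
  have hv := pxN_closed m
  rcases h4 with hm | hm | hm | hm
  all_goals (rw [hm] at hv; norm_num at hv; simp only [pxI, Int.toNat_natCast, hv, hmod, hm]; norm_num)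

-- B's body once the n ≤ 0 test is resolved and x is evaluated
lemma altB_eval (n x : Int) (hn : ¬ n ≤ 0)
    (hx : (if PySem.Int.mod n 4 = 0 then n
           else if PySem.Int.mod n 4 = 1 then 1
           else if PySem.Int.mod n 4 = 2 then n + 1 else 0) = x) :
    maximize_subset_alt n =
      if x = n then PySem.List.pyRange 1 (n + 1) 1
      else if PySem.Int.bxor x n ∈ PySem.List.pyRange 1 (n + 1) 1 then
        (PySem.List.remove? (PySem.List.pyRange 1 (n + 1) 1) (PySem.Int.bxor x n)).getD
          (PySem.List.pyRange 1 (n + 1) 1)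
      else PySem.List.pyRange 1 (n + 1) 1 := by
  simp only [maximize_subset_alt]
  rw [if_neg hn, hx]

-- A's loop runs to the first index m with prefix-XOR = n and returns [1..m]
lemma run_stop (n : Int) (fuel : Nat) : ∀ (i m : Int), 1 ≤ i → i + fuel = n + 1 → i ≤ m → m ≤ n →
    pxI m = n → (∀ j, i ≤ j → j < m → pxI j ≠ n) →
    pvLoopA n (PySem.List.pyRange i (n + 1) 1) (PySem.List.pyRange 1 i 1) (pxI (i - 1)) =
      PySem.List.pyRange 1 (m + 1) 1 := by
  induction fuel with
  | zero => intro i m h1 hf him hmn _ _; omega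
  | succ fuel ih =>
    intro i m h1 hf him hmn hhit hear
    have hib : i < n + 1 := by omega
    rw [PySem.List.pyRange_one_cons hib]
    have hsub : PySem.List.pyRange 1 i 1 ++ [i] = PySem.List.pyRange 1 (i + 1) 1 :=
      (PySem.List.pyRange_one_succ_right (by omega)).symm
    simp only [pvLoopA, pxI_step i h1, hsub]
    by_cases he : i = m
    · subst he; rw [if_pos hhit]
    · rw [if_neg (hear i le_rfl (by omega))]
      have := ih (i + 1) m (by omega) (by omega) (by omega) hmn hhit
        (fun j hj1 hj2 => hear j (by omega) hj2)
      rw [show i + 1 - 1 = i by ring] at this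
      exact this

-- A's loop with no early return: runs to the end and applies the fix-up
lemma run_full (n : Int) (fuel : Nat) : ∀ (i : Int), 1 ≤ i → i + fuel = n + 1 →
    (∀ j, i ≤ j → j ≤ n → pxI j ≠ n) →
    pvLoopA n (PySem.List.pyRange i (n + 1) 1) (PySem.List.pyRange 1 i 1) (pxI (i - 1)) =
      pvFinishA n (PySem.List.pyRange 1 (n + 1) 1) (pxI n) := by
  induction fuel with
  | zero =>
    intro i h1 hf _
    have hi : i = n + 1 := by omega
    subst hi
    rw [PySem.List.pyRange_one_eq_nil le_rfl]
    simp only [pvLoopA]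
    rw [show n + 1 - 1 = n by ring]
  | succ fuel ih =>
    intro i h1 hf hear
    have hib : i < n + 1 := by omega
    rw [PySem.List.pyRange_one_cons hib]
    have hsub : PySem.List.pyRange 1 i 1 ++ [i] = PySem.List.pyRange 1 (i + 1) 1 :=
      (PySem.List.pyRange_one_succ_right (by omega)).symm
    simp only [pvLoopA, pxI_step i h1, hsub]
    rw [if_neg (hear i le_rfl (by omega))]
    have := ih (i + 1) (by omega) (by omega) (fun j hj1 hj2 => hear j (by omega) hj2)
    rw [show i + 1 - 1 = i by ring] at this
    exact this

-- start A's loop from i = 1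
lemma startA (n : Int) :
    maximize_subset n = pvLoopA n (PySem.List.pyRange 1 (n + 1) 1) (PySem.List.pyRange 1 1 1) (pxI (1 - 1)) := by
  rw [PySem.List.pyRange_one_eq_nil (le_refl (1 : Int))]
  rfl

-- ===== VERDICT (by name: the statement is the Claim_ definition above) =====
theorem maximize_subset_spec : Claim_equal_maximize_subset := by
  intro n _
  unfold Spec_maximize_subset
  have hmod : PySem.Int.mod n 4 = n % 4 := PySem.Int.mod_eq_emod_of_pos (by norm_num)
  by_cases hn : n ≤ 0
  · -- empty range on both sides
    have hnil : PySem.List.pyRange 1 (n + 1) 1 = ([] : List Int) :=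
      PySem.List.pyRange_one_eq_nil (by omega)
    simp only [maximize_subset, maximize_subset_alt, hnil, pvLoopA, pvFinishA]
    split_ifs <;> simp [PySem.List.remove?]
  · have hpos : 1 ≤ n := by omega
    have h4 : n % 4 = 0 ∨ n % 4 = 1 ∨ n % 4 = 2 ∨ n % 4 = 3 := by omega
    rcases h4 with h | h | h | h
    · -- n % 4 = 0 (so n ≥ 4): A early-returns at i = n with [1..n]; B has x = n
      have hA : maximize_subset n = PySem.List.pyRange 1 (n + 1) 1 := by
        rw [startA]
        exact run_stop n n.toNat 1 n le_rfl (by omega) hpos le_rfl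
          (by rw [pxI_closed n (by omega)]; split_ifs <;> omega)
          (by intro j hj1 hj2; rw [pxI_closed j (by omega)]; split_ifs <;> omega)
      have hxv : (if PySem.Int.mod n 4 = 0 then n
          else if PySem.Int.mod n 4 = 1 then 1
          else if PySem.Int.mod n 4 = 2 then n + 1 else 0) = n := by
        rw [hmod, h]; norm_num
      rw [hA, altB_eval n n hn hxv, if_pos rfl]
    · -- n % 4 = 1: n = 1 early-returns with [1]; n ≥ 5 runs full with xor = 1
      by_cases h1 : n = 1
      · subst h1
        have hA : maximize_subset 1 = PySem.List.pyRange 1 (1 + 1) 1 := by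
          rw [startA]
          exact run_stop 1 (1 : Nat) 1 1 le_rfl (by norm_num) le_rfl le_rfl (by decide)
            (by intro j hj1 hj2; omega)
        have hxv : (if PySem.Int.mod 1 4 = 0 then 1
            else if PySem.Int.mod 1 4 = 1 then 1
            else if PySem.Int.mod 1 4 = 2 then 1 + 1 else 0) = (1 : Int) := by decide
        rw [hA, altB_eval 1 1 hn hxv, if_pos rfl]
      · have hA : maximize_subset n = pvFinishA n (PySem.List.pyRange 1 (n + 1) 1) (pxI n) := by
          rw [startA]
          exact run_full n n.toNat 1 le_rfl (by omega)
            (by intro j hj1 hj2; rw [pxI_closed j (by omega)]; split_ifs <;> omega)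
        have hx : pxI n = 1 := by rw [pxI_closed n (by omega)]; split_ifs <;> omega
        have hxv : (if PySem.Int.mod n 4 = 0 then n
            else if PySem.Int.mod n 4 = 1 then 1
            else if PySem.Int.mod n 4 = 2 then n + 1 else 0) = (1 : Int) := by
          rw [hmod, h]; norm_num
        rw [hA, hx, altB_eval n 1 hn hxv, if_neg (by omega : ¬ (1 : Int) = n)]
        simp only [pvFinishA]
        rw [if_pos (by omega : (1 : Int) ≠ n)]
    · -- n % 4 = 2: no early return, final xor = n + 1
      have hA : maximize_subset n = pvFinishA n (PySem.List.pyRange 1 (n + 1) 1) (pxI n) := by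
        rw [startA]
        exact run_full n n.toNat 1 le_rfl (by omega)
          (by intro j hj1 hj2; rw [pxI_closed j (by omega)]; split_ifs <;> omega)
      have hx : pxI n = n + 1 := by rw [pxI_closed n (by omega)]; split_ifs <;> omega
      have hxv : (if PySem.Int.mod n 4 = 0 then n
          else if PySem.Int.mod n 4 = 1 then 1
          else if PySem.Int.mod n 4 = 2 then n + 1 else 0) = n + 1 := by
        rw [hmod, h]; norm_num
      rw [hA, hx, altB_eval n (n + 1) hn hxv, if_neg (by omega : ¬ n + 1 = n)]
      simp only [pvFinishA]
      rw [if_pos (by omega : n + 1 ≠ n)]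
    · -- n % 4 = 3 (so n ≥ 3): A early-returns at i = n - 1 with [1..n-1]; B removes n
      have hA : maximize_subset n = PySem.List.pyRange 1 n 1 := by
        rw [startA]
        have := run_stop n n.toNat 1 (n - 1) le_rfl (by omega) (by omega) (by omega)
          (by rw [pxI_closed (n - 1) (by omega)]; split_ifs <;> omega)
          (by intro j hj1 hj2; rw [pxI_closed j (by omega)]; split_ifs <;> omega)
        rw [show n - 1 + 1 = n by ring] at this
        exact this
      have hx0 : PySem.Int.bxor 0 n = n := by
        rw [PySem.Int.bxor_comm, PySem.Int.bxor_zero]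
      have hmem : n ∈ PySem.List.pyRange 1 (n + 1) 1 :=
        PySem.List.mem_pyRange_one.mpr ⟨hpos, by omega⟩
      have hrem : (PySem.List.remove? (PySem.List.pyRange 1 (n + 1) 1) n).getD
          (PySem.List.pyRange 1 (n + 1) 1) = PySem.List.pyRange 1 n 1 := by
        rw [PySem.List.remove?_eq_some_erase _ n hmem, Option.getD_some,
          PySem.List.pyRange_one_succ_right hpos,
          List.erase_append_right _ (by simp [PySem.List.mem_pyRange_one])]
        simp
      have hxv : (if PySem.Int.mod n 4 = 0 then n
          else if PySem.Int.mod n 4 = 1 then 1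
          else if PySem.Int.mod n 4 = 2 then n + 1 else 0) = (0 : Int) := by
        rw [hmod, h]; norm_num
      rw [hA, altB_eval n 0 hn hxv, if_neg (by omega : ¬ (0 : Int) = n), hx0, if_pos hmem, hrem]
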